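-- pv_equiv track=rewrite | github.com/cdmismatch/cdmismatch | code/obsolete_compare_cd.py | CompressTrace
-- ===== SOURCE A (Python) =====
-- def CompressTrace(trace_list, ip_list): #如果是MOAS，要求不同AS之间按字母排序
--     loop_flag = False
--     new_list = []
--     pre_hop = ''
--     trace_to_ip_info = {}
--     for i in range(0, len(trace_list)):
--         hop = trace_list[i]
--         if hop != pre_hop:
--             if hop != '*' and hop != '?' and hop != '<>' and hop in new_list:
--                 for elem in new_list[new_list.index(hop) + 1:]:
--                     if elem != '*' and elem != '?' and elem != '<>':
--                         loop_flag = True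
--             new_list.append(hop)
--             pre_hop = hop
--         if hop not in trace_to_ip_info.keys():
--             trace_to_ip_info[hop] = []
--         if ip_list[i] not in trace_to_ip_info[hop]:
--             trace_to_ip_info[hop].append(ip_list[i]) #ip要保持有序，后面miss bgp hop的时候用到
--     return (new_list, trace_to_ip_info, loop_flag)
-- ===== SOURCE B (Python) =====
-- def CompressTrace(trace_list, ip_list):
--     # One pass: first-occurrence counters replace the 'in new_list'/'.index' scans,
--     # and a per-hop set replaces the 'ip in list' scan.
--     loop_flag = False
--     new_list = []
--     pre_hop = ''
--     info = {}          # hop -> ordered list of its IPs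
--     seen = {}          # hop -> set of the IPs already in info[hop]
--     first_cnt = {}     # non-wildcard hop -> # non-wildcards in new_list just after its first append
--     nonwild_total = 0  # # non-wildcards currently in new_list
--     for hop, ip in zip(trace_list, ip_list):
--         wild = hop in ('*', '?', '<>')
--         if hop != pre_hop:
--             if not wild:
--                 if hop in first_cnt:
--                     if first_cnt[hop] < nonwild_total:
--                         loop_flag = True
--                 else:
--                     first_cnt[hop] = nonwild_total + 1
--                 nonwild_total += 1
--             new_list.append(hop)
--             pre_hop = hop
--         if hop not in info:
--             info[hop] = []
--             seen[hop] = set()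
--         if ip not in seen[hop]:
--             seen[hop].add(ip)
--             info[hop].append(ip)
--     return (new_list, info, loop_flag)
-- ===== Notes on version B (the rewrite author's own statement) =====
-- stated objective: faster
-- what changed: Replaced A's repeated scans (hop in new_list, new_list.index plus the inner suffix loop, and 'ip in list') by a single pass that keeps a dict of per-hop non-wildcard prefix counts plus a running non-wildcard counter for loop detection, and a per-hop set for IP dedup.
import Mathlib
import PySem

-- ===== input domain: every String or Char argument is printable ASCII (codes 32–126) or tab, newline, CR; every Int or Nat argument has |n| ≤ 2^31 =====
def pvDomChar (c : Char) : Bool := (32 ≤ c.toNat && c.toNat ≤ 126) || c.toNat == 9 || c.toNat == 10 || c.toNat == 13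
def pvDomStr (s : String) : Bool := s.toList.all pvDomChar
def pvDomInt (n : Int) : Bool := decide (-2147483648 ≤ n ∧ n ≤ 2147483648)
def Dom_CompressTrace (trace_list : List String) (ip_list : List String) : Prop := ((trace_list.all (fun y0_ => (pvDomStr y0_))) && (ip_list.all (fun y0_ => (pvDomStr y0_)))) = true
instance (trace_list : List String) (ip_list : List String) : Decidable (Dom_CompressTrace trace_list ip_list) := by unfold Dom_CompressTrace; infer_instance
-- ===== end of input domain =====

-- B replaces A's quadratic rescans (membership/index in new_list, inner suffix loop, 'ip in list')
-- by one pass with first-occurrence non-wildcard counts and a per-hop IP set (objective: faster).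


-- ===== PORT A =====
abbrev CTStA := Bool × List String × String × PySem.Dict String (List String)

def CompressTraceStepA (st : CTStA) (hop ipv : String) : CTStA :=
  let lf := st.1
  let nl := st.2.1
  let ph := st.2.2.1
  let d := st.2.2.2
  let s1 : Bool × List String × String :=
    if hop ≠ ph then
      let lf :=
        if hop ≠ "*" ∧ hop ≠ "?" ∧ hop ≠ "<>" ∧ hop ∈ nl then
          (PySem.List.slice nl (some ((((PySem.List.index? nl hop).getD 0 : Nat) : Int) + 1)) none).foldl
            (fun lf elem => if elem ≠ "*" ∧ elem ≠ "?" ∧ elem ≠ "<>" then true else lf) lf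
        else lf
      (lf, nl ++ [hop], hop)
    else (lf, nl, ph)
  let d := if ¬ d.contains hop then d.insert hop [] else d
  let d := if ipv ∉ d.getD hop [] then d.modify hop [] (fun l => l ++ [ipv]) else d
  (s1.1, s1.2.1, s1.2.2, d)

def CompressTrace (trace_list : List String) (ip_list : List String) : List String × (List (String × List String)) × Bool :=
  let st := (PySem.List.pyRange 0 (trace_list.length : Int) 1).foldl
    (fun st i => CompressTraceStepA st (PySem.List.pyGetD trace_list i "") (PySem.List.pyGetD ip_list i ""))
    (false, [], "", PySem.Dict.empty)
  (st.2.1, st.2.2.2.items, st.1)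

-- ===== PORT B =====
abbrev CTStB := Bool × List String × String × PySem.Dict String (List String) × PySem.Dict String (PySem.Set String) × PySem.Dict String Nat × Nat

def CompressTraceStepB (st : CTStB) (hop ipv : String) : CTStB :=
  let lf := st.1
  let nl := st.2.1
  let ph := st.2.2.1
  let info := st.2.2.2.1
  let seen := st.2.2.2.2.1
  let fc := st.2.2.2.2.2.1
  let tot := st.2.2.2.2.2.2
  let wild : Bool := hop == "*" || hop == "?" || hop == "<>"
  let s1 : Bool × List String × String × PySem.Dict String Nat × Nat :=
    if hop ≠ ph then
      let s0 : Bool × PySem.Dict String Nat × Nat :=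
        if !wild then
          if fc.contains hop then
            ((if fc.getD hop 0 < tot then true else lf), fc, tot + 1)
          else (lf, fc.insert hop (tot + 1), tot + 1)
        else (lf, fc, tot)
      (s0.1, nl ++ [hop], hop, s0.2.1, s0.2.2)
    else (lf, nl, ph, fc, tot)
  let s2 : PySem.Dict String (List String) × PySem.Dict String (PySem.Set String) :=
    if info.contains hop then (info, seen)
    else (info.insert hop [], seen.insert hop PySem.Set.empty)
  let s3 : PySem.Dict String (List String) × PySem.Dict String (PySem.Set String) :=
    if PySem.Set.contains (s2.2.getD hop PySem.Set.empty) ipv then s2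
    else (s2.1.modify hop [] (fun l => l ++ [ipv]), s2.2.modify hop PySem.Set.empty (fun s => PySem.Set.add s ipv))
  (s1.1, s1.2.1, s1.2.2.1, s3.1, s3.2, s1.2.2.2.1, s1.2.2.2.2)

def CompressTrace_alt (trace_list : List String) (ip_list : List String) : List String × (List (String × List String)) × Bool :=
  let st := (trace_list.zip ip_list).foldl
    (fun st pr => CompressTraceStepB st pr.1 pr.2)
    (false, [], "", PySem.Dict.empty, PySem.Dict.empty, PySem.Dict.empty, 0)
  (st.2.1, st.2.2.2.1.items, st.1)

-- ===== PRECONDITION & SPEC =====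
-- A evaluates ip_list[i] for every i < len(trace_list): it raises IndexError iff ip_list is shorter.
def Pre_CompressTrace (trace_list : List String) (ip_list : List String) : Prop :=
  trace_list.length ≤ ip_list.length
instance (trace_list : List String) (ip_list : List String) : Decidable (Pre_CompressTrace trace_list ip_list) := by unfold Pre_CompressTrace; infer_instance

def pvWitness_CompressTrace : List String × List String := (["A", "A", "*", "A"], ["1.1", "1.2", "9.9", "1.1"])

def Spec_CompressTrace (trace_list : List String) (ip_list : List String) (out : List String × (List (String × List String)) × Bool) : Prop := out = CompressTrace_alt trace_list ip_list
instance (trace_list : List String) (ip_list : List String) (out : List String × (List (String × List String)) × Bool) : Decidable (Spec_CompressTrace trace_list ip_list out) := by unfold Spec_CompressTrace; infer_instance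

-- ===== CLAIM (what is proved, stated in full; the proofs are below) =====
def Claim_equal_CompressTrace : Prop := ∀ (trace_list : List String) (ip_list : List String), Dom_CompressTrace trace_list ip_list → Pre_CompressTrace trace_list ip_list → Spec_CompressTrace trace_list ip_list (CompressTrace trace_list ip_list)

-- ===== LEMMAS AND PROOFS =====


def CTnonwild (s : String) : Bool := !(s == "*" || s == "?" || s == "<>")

/-- The coupling invariant between A's fold state and B's fold state. -/
def CTInv (a : CTStA) (b : CTStB) : Prop :=
  b.1 = a.1 ∧ b.2.1 = a.2.1 ∧ b.2.2.1 = a.2.2.1 ∧ b.2.2.2.1 = a.2.2.2 ∧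
  (∀ h : String, (b.2.2.2.2.1).getD h [] = (a.2.2.2).getD h []) ∧
  b.2.2.2.2.2.2 = a.2.1.countP CTnonwild ∧
  (∀ h : String, (b.2.2.2.2.2.1).contains h = (CTnonwild h && decide (h ∈ a.2.1))) ∧
  (∀ (h : String) (k : Nat), (b.2.2.2.2.2.1).get? h = some k →
      ∃ pre suf, a.2.1 = pre ++ h :: suf ∧ h ∉ pre ∧ k = (pre ++ [h]).countP CTnonwild)

/-- A's inner loop-detection scan equals the prefix-count comparison. -/
theorem CTloopcheck (pre suf : List String) (hop : String) (lf : Bool)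
    (hnw : CTnonwild hop = true) (hnp : hop ∉ pre) :
    (PySem.List.slice (pre ++ hop :: suf)
        (some ((((PySem.List.index? (pre ++ hop :: suf) hop).getD 0 : Nat) : Int) + 1)) none).foldl
        (fun lf elem => if elem ≠ "*" ∧ elem ≠ "?" ∧ elem ≠ "<>" then true else lf) lf
      = if (pre ++ [hop]).countP CTnonwild < (pre ++ hop :: suf).countP CTnonwild then true else lf := by
  have hidx : PySem.List.index? (pre ++ hop :: suf) hop = some pre.length :=
    (PySem.List.index?_eq_some_iff _ _ _).mpr ⟨pre, suf, rfl, rfl, hnp⟩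
  rw [hidx]
  have hc : ((((some pre.length).getD 0 : Nat) : Int) + 1) = ((pre.length + 1 : Nat) : Int) := by
    simp
  rw [hc, PySem.List.slice_from_natCast]
  have hdrop : (pre ++ hop :: suf).drop (pre.length + 1) = suf := by
    have h1 : pre ++ hop :: suf = (pre ++ [hop]) ++ suf := by simp
    have h2 : (pre ++ [hop]).length = pre.length + 1 := by simp
    rw [h1, ← h2, List.drop_left]
  rw [hdrop]
  rw [PySem.List.foldl_congr_mem' suf _ (fun ok x => if CTnonwild x then true else ok) lf
      (by intro x _ acc; by_cases hx : CTnonwild x = true <;>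
          simp only [CTnonwild, Bool.not_eq_true', Bool.or_eq_false_iff, beq_eq_false_iff_ne] at hx <;>
          simp [CTnonwild, hx] <;> tauto)]
  rw [PySem.List.foldl_if_true_eq]
  have hcnt : (pre ++ hop :: suf).countP CTnonwild
      = (pre ++ [hop]).countP CTnonwild + suf.countP CTnonwild := by
    simp [List.countP_append, hnw]; ring
  cases hany : suf.any CTnonwild with
  | true =>
      have hp : 0 < suf.countP CTnonwild := by
        rw [List.any_eq_true] at hany; obtain ⟨x, hx, hpx⟩ := hany
        exact List.countP_pos_iff.mpr ⟨x, hx, hpx⟩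
      rw [hcnt, if_pos (by omega)]; simp
  | false =>
      have hz : suf.countP CTnonwild = 0 := by
        rw [List.countP_eq_zero]; intro x hx
        by_contra hpx
        exact absurd (List.any_eq_true.mpr ⟨x, hx, by simpa using hpx⟩) (by simp [hany])
      rw [hcnt, if_neg (by omega)]; simp

/-- The extension of a first-occurrence decomposition by one appended element. -/
theorem CTdecomp_extend (nl : List String) (x : String) (fc : PySem.Dict String Nat)
    (hdec : ∀ (h : String) (k : Nat), fc.get? h = some k →
        ∃ pre suf, nl = pre ++ h :: suf ∧ h ∉ pre ∧ k = (pre ++ [h]).countP CTnonwild) :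
    ∀ (h : String) (k : Nat), fc.get? h = some k →
        ∃ pre suf, nl ++ [x] = pre ++ h :: suf ∧ h ∉ pre ∧ k = (pre ++ [h]).countP CTnonwild := by
  intro h k hk
  obtain ⟨pre, suf, hnl, hnp, hkc⟩ := hdec h k hk
  exact ⟨pre, suf ++ [x], by simp [hnl], hnp, hkc⟩

/-- The IP-dict halves of the two steps stay coupled. -/
theorem CTdict (d : PySem.Dict String (List String)) (seen : PySem.Dict String (PySem.Set String))
    (hop ipv : String) (hs : ∀ h, seen.getD h [] = d.getD h []) :
    (if PySem.Set.contains ((if d.contains hop then (d, seen) else (d.insert hop [], seen.insert hop PySem.Set.empty)).2.getD hop PySem.Set.empty) ipv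
        then (if d.contains hop then (d, seen) else (d.insert hop [], seen.insert hop PySem.Set.empty))
        else ((if d.contains hop then (d, seen) else (d.insert hop [], seen.insert hop PySem.Set.empty)).1.modify hop [] (fun l => l ++ [ipv]),
              (if d.contains hop then (d, seen) else (d.insert hop [], seen.insert hop PySem.Set.empty)).2.modify hop PySem.Set.empty (fun s => PySem.Set.add s ipv))).1
      = (if ipv ∉ (if ¬ d.contains hop then d.insert hop [] else d).getD hop []
          then (if ¬ d.contains hop then d.insert hop [] else d).modify hop [] (fun l => l ++ [ipv])
          else (if ¬ d.contains hop then d.insert hop [] else d)) ∧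
    ∀ h, (if PySem.Set.contains ((if d.contains hop then (d, seen) else (d.insert hop [], seen.insert hop PySem.Set.empty)).2.getD hop PySem.Set.empty) ipv
        then (if d.contains hop then (d, seen) else (d.insert hop [], seen.insert hop PySem.Set.empty))
        else ((if d.contains hop then (d, seen) else (d.insert hop [], seen.insert hop PySem.Set.empty)).1.modify hop [] (fun l => l ++ [ipv]),
              (if d.contains hop then (d, seen) else (d.insert hop [], seen.insert hop PySem.Set.empty)).2.modify hop PySem.Set.empty (fun s => PySem.Set.add s ipv))).2.getD h []
      = (if ipv ∉ (if ¬ d.contains hop then d.insert hop [] else d).getD hop []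
          then (if ¬ d.contains hop then d.insert hop [] else d).modify hop [] (fun l => l ++ [ipv])
          else (if ¬ d.contains hop then d.insert hop [] else d)).getD h [] := by
  by_cases hc : d.contains hop = true
  · have hs1 : seen.getD hop ([] : PySem.Set String) = d.getD hop [] := hs hop
    by_cases hm : ipv ∈ d.getD hop []
    · simp [hc, hs1, hm]
      exact hs
    · simp [hc, hs1, hm]
      intro h
      rw [PySem.Dict.getD_modify, PySem.Dict.getD_modify]
      by_cases hh : h = hop
      · rw [if_pos hh, if_pos hh, hs1, PySem.Set.add_of_not_mem hm]
      · rw [if_neg hh, if_neg hh]; exact hs h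
  · have hcf : d.contains hop = false := by simpa using hc
    have hins : ∀ h, (seen.insert hop ([] : PySem.Set String)).getD h ([] : PySem.Set String)
        = (d.insert hop []).getD h [] := by
      intro h
      rw [PySem.Dict.getD_insert, PySem.Dict.getD_insert]
      by_cases hh : h = hop
      · rw [if_pos hh, if_pos hh]
      · rw [if_neg hh, if_neg hh]; exact hs h
    have hs1 : (seen.insert hop ([] : PySem.Set String)).getD hop ([] : PySem.Set String)
        = (d.insert hop []).getD hop [] := hins hop
    by_cases hm : ipv ∈ (d.insert hop []).getD hop []
    · exfalso
      rw [PySem.Dict.getD_insert_self] at hm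
      simp at hm
    · simp [hcf, hs1]
      intro h
      rw [PySem.Dict.getD_modify, PySem.Dict.getD_modify]
      by_cases hh : h = hop
      · rw [if_pos hh, if_pos hh, hs1, PySem.Set.add_of_not_mem hm]
      · rw [if_neg hh, if_neg hh]; exact hins h

theorem CTmem_extend (nl : List String) (hop : String) (fc : PySem.Dict String Nat)
    (hfc : ∀ h : String, fc.contains h = (CTnonwild h && decide (h ∈ nl)))
    (hwild : CTnonwild hop = false) :
    ∀ h : String, fc.contains h = (CTnonwild h && decide (h ∈ nl ++ [hop])) := by
  intro h
  rw [hfc h]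
  by_cases hnwh : CTnonwild h = true
  · have hne : h ≠ hop := fun e => by rw [e, hwild] at hnwh; cases hnwh
    simp [hnwh, List.mem_append, hne]
  · simp only [Bool.not_eq_true] at hnwh
    simp [hnwh]

theorem CTstep (a : CTStA) (b : CTStB) (hop ipv : String) (h : CTInv a b) :
    CTInv (CompressTraceStepA a hop ipv) (CompressTraceStepB b hop ipv) := by
  obtain ⟨lfA, nlA, phA, dA⟩ := a
  obtain ⟨lf, nl, ph, d, seen, fc, tot⟩ := b
  obtain ⟨e1, e2, e3, e4, hseen, htot, hfc, hdec⟩ := h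
  dsimp only at e1 e2 e3 e4 hseen htot hfc hdec
  subst e1 e2 e3 e4 htot
  have hd := CTdict d seen hop ipv hseen
  simp only [CompressTraceStepA, CompressTraceStepB]
  unfold CTInv
  dsimp only
  by_cases hph : hop = ph
  · subst hph
    rw [if_neg (fun hh : hop ≠ hop => hh rfl)]
    rw [if_neg (fun hh : hop ≠ hop => hh rfl)]
    exact ⟨rfl, rfl, rfl, hd.1, hd.2, rfl, hfc, hdec⟩
  · rw [if_pos hph, if_pos hph]
    by_cases hnw : CTnonwild hop = true
    · have ha1 : hop ≠ "*" := fun e => absurd (e ▸ hnw) (by decide)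
      have ha2 : hop ≠ "?" := fun e => absurd (e ▸ hnw) (by decide)
      have ha3 : hop ≠ "<>" := fun e => absurd (e ▸ hnw) (by decide)
      rw [if_pos (show (!(hop == "*" || hop == "?" || hop == "<>")) = true from hnw)]
      have hcnt1 : (nl ++ [hop]).countP CTnonwild = nl.countP CTnonwild + 1 := by
        simp [List.countP_append, hnw]
      by_cases hm : hop ∈ nl
      · have hct : fc.contains hop = true := by rw [hfc hop]; simp [hnw, hm]
        cases hgk : fc.get? hop with
        | none =>
            rw [PySem.Dict.get?_eq_none_iff_contains, hct] at hgk; cases hgk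
        | some k =>
            obtain ⟨pre, suf, hnl, hnp, hk⟩ := hdec hop k hgk
            have hgd : fc.getD hop 0 = k := PySem.Dict.getD_of_get?_eq_some fc 0 hgk
            subst hnl
            rw [if_pos (show hop ≠ "*" ∧ hop ≠ "?" ∧ hop ≠ "<>" ∧ hop ∈ pre ++ hop :: suf
                  from ⟨ha1, ha2, ha3, hm⟩)]
            rw [if_pos hct]
            rw [CTloopcheck pre suf hop lf hnw hnp, hgd, hk]
            refine ⟨rfl, rfl, rfl, hd.1, hd.2, by rw [hcnt1], ?_, ?_⟩
            · intro h
              by_cases hh : h = hop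
              · subst hh; rw [hct]; simp [hnw, List.mem_append]
              · rw [hfc h]; simp [List.mem_append, hh]
            · exact CTdecomp_extend _ hop fc hdec
      · have hct : fc.contains hop = false := by rw [hfc hop]; simp [hm]
        rw [if_neg (fun hc : _ ∧ _ ∧ _ ∧ hop ∈ nl => hm hc.2.2.2)]
        rw [if_neg (fun hc : fc.contains hop = true => by rw [hct] at hc; cases hc)]
        refine ⟨rfl, rfl, rfl, hd.1, hd.2, by rw [hcnt1], ?_, ?_⟩
        · intro h
          rw [PySem.Dict.contains_insert]
          by_cases hh : h = hop
          · subst hh; simp [hnw, List.mem_append]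
          · have hb : (h == hop) = false := by simp [hh]
            rw [hb, Bool.false_or, hfc h]
            simp [List.mem_append, hh]
        · intro h k hk
          rw [PySem.Dict.get?_insert] at hk
          by_cases hh : h = hop
          · rw [if_pos hh] at hk
            subst hh
            refine ⟨nl, [], rfl, hm, ?_⟩
            have hkk : k = nl.countP CTnonwild + 1 := by injection hk with h'; omega
            rw [hkk, ← hcnt1]
          · rw [if_neg hh] at hk
            exact CTdecomp_extend _ hop fc hdec h k hk
    · have hwild : CTnonwild hop = false := by simpa using hnw
      have hA : ¬ (hop ≠ "*" ∧ hop ≠ "?" ∧ hop ≠ "<>" ∧ hop ∈ nl) := by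
        unfold CTnonwild at hwild
        simp only [Bool.not_eq_false', Bool.or_eq_true, beq_iff_eq] at hwild
        rintro ⟨ha, hb, hc, -⟩
        rcases hwild with (h | h) | h
        · exact ha h
        · exact hb h
        · exact hc h
      rw [if_neg hA]
      rw [if_neg (show ¬ ((!(hop == "*" || hop == "?" || hop == "<>")) = true) by
            unfold CTnonwild at hwild; simp [hwild])]
      have hcnt0 : (nl ++ [hop]).countP CTnonwild = nl.countP CTnonwild := by
        simp [List.countP_append, hwild]
      exact ⟨rfl, rfl, rfl, hd.1, hd.2, by rw [hcnt0], CTmem_extend nl hop fc hfc hwild,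
        CTdecomp_extend _ hop fc hdec⟩

theorem CTfold (l : List (String × String)) (a : CTStA) (b : CTStB) (h : CTInv a b) :
    CTInv (l.foldl (fun st pr => CompressTraceStepA st pr.1 pr.2) a)
          (l.foldl (fun st pr => CompressTraceStepB st pr.1 pr.2) b) := by
  induction l generalizing a b with
  | nil => exact h
  | cons x xs ih => exact ih _ _ (CTstep a b x.1 x.2 h)

theorem CTfoldA_eq_zip (t p : List String) (hlen : t.length ≤ p.length) (init : CTStA) :
    (PySem.List.pyRange 0 (t.length : Int) 1).foldl
      (fun st i => CompressTraceStepA st (PySem.List.pyGetD t i "") (PySem.List.pyGetD p i "")) init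
    = (t.zip p).foldl (fun st pr => CompressTraceStepA st pr.1 pr.2) init := by
  have lz : (t.zip p).length = t.length := by
    rw [List.length_zip]; omega
  have hb : ((t.length : Int)) = ((t.zip p).length : Int) := by rw [lz]
  rw [hb]
  rw [PySem.List.foldl_congr_mem (PySem.List.pyRange 0 ((t.zip p).length : Int) 1) _
      (fun st i => CompressTraceStepA st (PySem.List.pyGetD (t.zip p) i ("", "")).1
        (PySem.List.pyGetD (t.zip p) i ("", "")).2) init ?_]
  · exact PySem.List.foldl_pyRange_zero_pyGetD' (t.zip p) ("", "")
      (fun st pr => CompressTraceStepA st pr.1 pr.2) init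
  · intro st i hi
    rw [PySem.List.mem_pyRange_one] at hi
    obtain ⟨h0, h1⟩ := hi
    have hit : i < (t.length : Int) := by omega
    have hip : i < (p.length : Int) := by omega
    have hiz : i < ((t.zip p).length : Int) := by omega
    dsimp only
    rw [PySem.List.pyGetD_eq_getElem t "" h0 hit,
        PySem.List.pyGetD_eq_getElem p "" h0 hip,
        PySem.List.pyGetD_eq_getElem (t.zip p) ("", "") h0 hiz]
    rw [List.getElem_zip]

-- ===== VERDICT (by name: the statement is the Claim_ definition above) =====
theorem CompressTrace_spec : Claim_equal_CompressTrace := by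
  intro t p _ hpre
  unfold Spec_CompressTrace CompressTrace CompressTrace_alt
  rw [CTfoldA_eq_zip t p hpre]
  have h := CTfold (t.zip p) (false, [], "", PySem.Dict.empty)
      (false, [], "", PySem.Dict.empty, PySem.Dict.empty, PySem.Dict.empty, 0)
      (by refine ⟨rfl, rfl, rfl, rfl, fun h => rfl, rfl, fun h => by simp [PySem.Dict.contains_empty], fun h k hk => by simp [PySem.Dict.get?_empty] at hk⟩)
  obtain ⟨h1, h2, h3, h4, -⟩ := h
  simp only [h1, h2, h4]
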